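-- pv_equiv track=rewrite | github.com/wldnjszz1/algorithm-study | programmers/level2/practice1.py | solution
-- ===== SOURCE A (Python) =====
-- from collections import deque
--
-- def solution(progresses, speeds):
--     answer = list()
--     queue = deque()
--     a = 1
--     for i in range(len(progresses)):
--         if (100 - progresses[i]) % speeds[i] != 0:
--             queue.append(((100 - progresses[i]) // speeds[i]) + 1)
--         else:
--             queue.append((100 - progresses[i]) // speeds[i])
--
--     pop = queue.popleft()
--     while queue:
--         if pop >= queue[0]:
--             queue.popleft()
--             a += 1
--         else:
--             answer.append(a)
--             a = 1
--             pop = queue.popleft()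
--     answer.append(a)
--
--     return answer
-- ===== SOURCE B (Python) =====
-- def solution(progresses, speeds):
--     # Two-phase: batch-start boundary indices, then consecutive differences.
--     days = [-(-(100 - p) // s) for p, s in zip(progresses, speeds)]
--     starts = [0]
--     leader = days[0]
--     for i, d in enumerate(days[1:], 1):
--         if d > leader:
--             starts.append(i)
--             leader = d
--     starts.append(len(days))
--     return [b - a for a, b in zip(starts, starts[1:])]
-- ===== Notes on version B (the rewrite author's own statement) =====
-- stated objective: alternative
-- what changed: Replaces the deque run-length scan (popleft/counter with a running leader) by a two-phase boundary computation: integer ceiling division builds the days list, one pass records batch-start indices under a running leader, and the answer is the list of consecutive differences of the boundary-index list.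
import Mathlib
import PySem

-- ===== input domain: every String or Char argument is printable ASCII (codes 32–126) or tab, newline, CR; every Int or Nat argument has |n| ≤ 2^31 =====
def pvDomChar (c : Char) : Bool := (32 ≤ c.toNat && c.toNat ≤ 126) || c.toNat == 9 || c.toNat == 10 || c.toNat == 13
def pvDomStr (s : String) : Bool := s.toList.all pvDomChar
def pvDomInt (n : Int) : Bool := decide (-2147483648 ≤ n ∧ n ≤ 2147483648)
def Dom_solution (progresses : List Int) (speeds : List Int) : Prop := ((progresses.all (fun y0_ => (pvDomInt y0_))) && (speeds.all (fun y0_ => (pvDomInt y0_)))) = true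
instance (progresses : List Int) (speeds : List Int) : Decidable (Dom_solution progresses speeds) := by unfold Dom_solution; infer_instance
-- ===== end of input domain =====

-- B replaces A's deque run-length scan by a two-phase boundary computation (batch-start
-- indices, then consecutive differences); same O(n) cost, different decomposition.

-- ===== PORT A =====
-- the first for-loop: build the queue of day counts
def solQueue (progresses : List Int) (speeds : List Int) : List Int :=
  (PySem.List.pyRange 0 progresses.length 1).foldl
    (fun queue i =>
      if PySem.Int.mod (100 - PySem.List.pyGetD progresses i 0) (PySem.List.pyGetD speeds i 0) ≠ 0 then
        queue ++ [PySem.Int.floordiv (100 - PySem.List.pyGetD progresses i 0) (PySem.List.pyGetD speeds i 0) + 1]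
      else
        queue ++ [PySem.Int.floordiv (100 - PySem.List.pyGetD progresses i 0) (PySem.List.pyGetD speeds i 0)]) []

-- the while-loop over the remaining queue, with state (pop, a, answer)
def solWhile (pop : Int) (a : Int) (answer : List Int) : List Int → List Int
  | [] => answer ++ [a]
  | q :: qs => if pop ≥ q then solWhile pop (a + 1) answer qs
               else solWhile q 1 (answer ++ [a]) qs

def solution (progresses : List Int) (speeds : List Int) : List Int :=
  match solQueue progresses speeds with
  | [] => []                      -- Python raises IndexError here (queue.popleft() on empty); excluded by Pre_
  | pop :: rest => solWhile pop 1 [] rest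

-- ===== PORT B =====
def solution_alt (progresses : List Int) (speeds : List Int) : List Int :=
  let days := (progresses.zip speeds).map (fun ps => -(PySem.Int.floordiv (-(100 - ps.1)) ps.2))
  match days with
  | [] => []                      -- Python raises IndexError here (days[0]); excluded by Pre_
  | d0 :: _ =>
    let st := (PySem.List.enumerate (PySem.List.slice days (some 1) none) 1).foldl
      (fun (sl : List Int × Int) id_ =>
        if id_.2 > sl.2 then (sl.1 ++ [id_.1], id_.2) else sl)
      ([0], d0)
    let starts := st.1 ++ [(days.length : Int)]
    (starts.zip (PySem.List.slice starts (some 1) none)).map (fun ab => ab.2 - ab.1)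

-- ===== PRECONDITION & SPEC =====
-- Pre_ excludes exactly the inputs on which A raises: empty progresses (popleft on an empty
-- deque), speeds shorter than progresses (IndexError), and a zero speed used by the loop
-- (ZeroDivisionError).
def Pre_solution (progresses : List Int) (speeds : List Int) : Prop :=
  progresses ≠ [] ∧ progresses.length ≤ speeds.length ∧
    ∀ s ∈ speeds.take progresses.length, s ≠ 0
instance (progresses : List Int) (speeds : List Int) : Decidable (Pre_solution progresses speeds) := by
  unfold Pre_solution; infer_instance

def pvWitness_solution : List Int × List Int := ([93, 30, 55], [1, 30, 5])

def Spec_solution (progresses : List Int) (speeds : List Int) (out : List Int) : Prop := out = solution_alt progresses speeds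
instance (progresses : List Int) (speeds : List Int) (out : List Int) : Decidable (Spec_solution progresses speeds out) := by unfold Spec_solution; infer_instance

-- ===== CLAIM (what is proved, stated in full; the proofs are below) =====
def Claim_equal_solution : Prop := ∀ (progresses : List Int) (speeds : List Int), Dom_solution progresses speeds → Pre_solution progresses speeds → Spec_solution progresses speeds (solution progresses speeds)

-- ===== LEMMAS AND PROOFS =====

-- ceiling division: A's branch formula equals B's -((-x)//s), for s ≠ 0
theorem ceil_branch_eq (x s : Int) (hs : s ≠ 0) :
    (if PySem.Int.mod x s ≠ 0 then PySem.Int.floordiv x s + 1 else PySem.Int.floordiv x s)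
      = -(PySem.Int.floordiv (-x) s) := by
  have hd := PySem.Int.mod_eq_zero_iff_dvd x s
  simp only [PySem.Int.floordiv] at *
  rw [Int.neg_fdiv]
  split_ifs with h1 h2 h2 <;> simp_all
  omega

-- A's queue equals B's days list
theorem queue_eq_days (progresses speeds : List Int)
    (hlen : progresses.length ≤ speeds.length)
    (hnz : ∀ s ∈ speeds.take progresses.length, s ≠ 0) :
    solQueue progresses speeds
      = (progresses.zip speeds).map (fun ps => -(PySem.Int.floordiv (-(100 - ps.1)) ps.2)) := by
  unfold solQueue
  rw [show (fun (queue : List Int) (i : Int) =>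
      if PySem.Int.mod (100 - PySem.List.pyGetD progresses i 0) (PySem.List.pyGetD speeds i 0) ≠ 0 then
        queue ++ [PySem.Int.floordiv (100 - PySem.List.pyGetD progresses i 0) (PySem.List.pyGetD speeds i 0) + 1]
      else
        queue ++ [PySem.Int.floordiv (100 - PySem.List.pyGetD progresses i 0) (PySem.List.pyGetD speeds i 0)])
    = (fun queue i => queue ++
        [if PySem.Int.mod (100 - PySem.List.pyGetD progresses i 0) (PySem.List.pyGetD speeds i 0) ≠ 0 then
           PySem.Int.floordiv (100 - PySem.List.pyGetD progresses i 0) (PySem.List.pyGetD speeds i 0) + 1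
         else
           PySem.Int.floordiv (100 - PySem.List.pyGetD progresses i 0) (PySem.List.pyGetD speeds i 0)]) from by
    funext queue i; split_ifs <;> rfl]
  rw [PySem.List.foldl_append_singleton_eq_map, PySem.List.pyRange_one]
  simp only [Int.sub_zero, Int.toNat_natCast, List.map_map]
  induction progresses generalizing speeds with
  | nil => simp
  | cons p ps ih =>
    cases speeds with
    | nil => simp at hlen
    | cons s ss =>
      simp only [List.length_cons, List.zip_cons_cons, List.map_cons,
        List.range_succ_eq_map, List.map_cons, List.map_map]
      refine List.cons_eq_cons.mpr ⟨?_, ?_⟩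
      · have hs : s ≠ 0 := hnz s (by simp)
        simpa [Function.comp] using ceil_branch_eq (100 - p) s hs
      · have hih := ih ss (by simpa using hlen)
          (fun t ht => hnz t (by simp only [List.length_cons, List.take_succ_cons]; exact List.mem_cons_of_mem _ ht))
        rw [← hih]
        apply List.map_congr_left
        intro k _
        simp only [Function.comp, zero_add, Nat.succ_eq_add_one,
          PySem.List.pyGetD_natCast, List.getD_cons_succ]

-- the run-length core of A's while loop
def grp (pop : Int) (a : Int) : List Int → List Int
  | [] => [a]
  | q :: qs => if pop ≥ q then grp pop (a + 1) qs else a :: grp q 1 qs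

theorem solWhile_eq_grp (pop a : Int) (answer qs : List Int) :
    solWhile pop a answer qs = answer ++ grp pop a qs := by
  induction qs generalizing pop a answer with
  | nil => simp [solWhile, grp]
  | cons q qs ih =>
    simp only [solWhile, grp]
    split_ifs
    · exact ih _ _ _
    · rw [ih]; simp

-- the batch-start indices recorded by B's loop
def ns (i : Int) (leader : Int) : List Int → List Int
  | [] => []
  | d :: t => if d > leader then i :: ns (i + 1) d t else ns (i + 1) leader t

theorem foldl_enum_eq_ns (t : List Int) (i leader : Int) (S : List Int) :
    ((PySem.List.enumerate t i).foldl
      (fun (sl : List Int × Int) id_ =>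
        if id_.2 > sl.2 then (sl.1 ++ [id_.1], id_.2) else sl) (S, leader)).1
    = S ++ ns i leader t := by
  induction t generalizing i leader S with
  | nil => simp [PySem.List.enumerate_nil, ns]
  | cons d t ih =>
    rw [PySem.List.enumerate_cons]
    simp only [List.foldl_cons, ns]
    split_ifs
    · rw [ih]; simp
    · exact ih _ _ _

-- consecutive differences of a boundary list
def fd (l : List Int) : List Int :=
  (l.zip l.tail).map (fun ab => ab.2 - ab.1)

theorem fd_cons_cons (x y : Int) (r : List Int) :
    fd (x :: y :: r) = (y - x) :: fd (y :: r) := by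
  simp [fd]

-- main correspondence: A's run-length groups are B's boundary differences
theorem grp_eq_fd (t : List Int) (leader a s0 : Int) :
    grp leader a t = fd (s0 :: (ns (s0 + a) leader t ++ [s0 + a + (t.length : Int)])) := by
  induction t generalizing leader a s0 with
  | nil => simp [grp, ns, fd]
  | cons d t ih =>
    simp only [grp, ns]
    by_cases h : d > leader
    · have hns : ¬ leader ≥ d := by omega
      simp only [h, if_pos, hns, if_neg, not_false_iff]
      rw [show (((d :: t).length : Int)) = (t.length : Int) + 1 from by simp]
      rw [show s0 + a + ((t.length : Int) + 1) = s0 + a + 1 + (t.length : Int) from by ring]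
      rw [List.cons_append, fd_cons_cons, show s0 + a - s0 = a from by ring]
      rw [← ih d 1 (s0 + a)]
    · have hge : leader ≥ d := by omega
      simp only [h, if_neg, not_false_iff, hge, if_pos]
      rw [show (((d :: t).length : Int)) = (t.length : Int) + 1 from by simp]
      rw [show s0 + a + ((t.length : Int) + 1) = s0 + (a + 1) + (t.length : Int) from by ring]
      rw [show s0 + a + 1 = s0 + (a + 1) from by ring]
      exact ih leader (a + 1) s0

-- ===== VERDICT (by name: the statement is the Claim_ definition above) =====
theorem solution_spec : Claim_equal_solution := by
  intro progresses speeds _ hpre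
  obtain ⟨hne, hlen, hnz⟩ := hpre
  unfold Spec_solution solution solution_alt
  rw [queue_eq_days progresses speeds hlen hnz]
  set days := (progresses.zip speeds).map (fun ps => -(PySem.Int.floordiv (-(100 - ps.1)) ps.2)) with hdays
  cases hd : days with
  | nil =>
    exfalso
    apply hne
    have h0 : (progresses.zip speeds).length = 0 := by
      have := congrArg List.length hd
      simpa [hdays] using this
    rw [List.length_zip] at h0
    cases progresses with
    | nil => rfl
    | cons p ps => exfalso; simp only [List.length_cons] at h0 hlen; omega
  | cons d0 tail =>
    simp only
    rw [solWhile_eq_grp, List.nil_append, foldl_enum_eq_ns]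
    rw [show PySem.List.slice (d0 :: tail) (some 1) none = tail from by
      rw [PySem.List.slice_from_one]; rfl]
    rw [PySem.List.slice_from_one]
    rw [grp_eq_fd tail d0 1 0]
    unfold fd
    simp only [List.cons_append, List.nil_append, List.length_cons, List.tail_cons]
    norm_num
    ring_nf
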